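-- pv_equiv track=rewrite | github.com/theaayushstha1/COSC_352_FALL_2025 | kaleb_dunn/project9/pdfsearch.py | extract_passages
-- ===== SOURCE A (Python) =====
-- def extract_passages(pages, window_size=3):
--     """Extract passages from pages using sliding window."""
--     passages = []
--     passage_pages = []
--
--     for page_num, page_text in enumerate(pages):
--         # Split into sentences
--         sentences = []
--         current = ""
--
--         for i, c in enumerate(page_text):
--             current += c
--             if c == '.' and i + 1 < len(page_text):
--                 if page_text[i + 1] in ' \n':
--                     if len(current.strip()) > 20:
--                         sentences.append(current)
--                     current = ""
--
--         # Create overlapping windows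
--         for i in range(len(sentences) - window_size + 1):
--             passage = ''.join(sentences[i:i + window_size])
--             passages.append(passage)
--             passage_pages.append(page_num + 1)
--
--     return passages, passage_pages
-- ===== SOURCE B (Python) =====
-- def extract_passages(pages, window_size=3):
--     """Extract passages from pages using sliding window (boundary-index + slice version)."""
--     passages = []
--     passage_pages = []
--     for page_num, page_text in enumerate(pages):
--         n = len(page_text)
--         # 1) find sentence boundaries: a '.' followed by a space or newline
--         boundaries = [i for i, c in enumerate(page_text)
--                       if c == '.' and i + 1 < n and page_text[i + 1] in ' \n']
--         # 2) slice candidate sentences between consecutive boundaries;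
--         #    text after the last boundary is discarded
--         sentences = []
--         prev = -1
--         for b in boundaries:
--             seg = page_text[prev + 1:b + 1]
--             if len(seg.strip()) > 20:
--                 sentences.append(seg)
--             prev = b
--         # 3) overlapping windows
--         for i in range(len(sentences) - window_size + 1):
--             passages.append(''.join(sentences[i:i + window_size]))
--             passage_pages.append(page_num + 1)
--     return passages, passage_pages
-- ===== Notes on version B (the rewrite author's own statement) =====
-- stated objective: alternative
-- what changed: B replaces A's running character accumulator ('current += c' with resets) by a two-phase decomposition per page: first collect the boundary indices (a '.' followed by space/newline) with one comprehension, then slice each candidate sentence out of the page text between consecutive boundaries before windowing.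
import Mathlib
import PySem

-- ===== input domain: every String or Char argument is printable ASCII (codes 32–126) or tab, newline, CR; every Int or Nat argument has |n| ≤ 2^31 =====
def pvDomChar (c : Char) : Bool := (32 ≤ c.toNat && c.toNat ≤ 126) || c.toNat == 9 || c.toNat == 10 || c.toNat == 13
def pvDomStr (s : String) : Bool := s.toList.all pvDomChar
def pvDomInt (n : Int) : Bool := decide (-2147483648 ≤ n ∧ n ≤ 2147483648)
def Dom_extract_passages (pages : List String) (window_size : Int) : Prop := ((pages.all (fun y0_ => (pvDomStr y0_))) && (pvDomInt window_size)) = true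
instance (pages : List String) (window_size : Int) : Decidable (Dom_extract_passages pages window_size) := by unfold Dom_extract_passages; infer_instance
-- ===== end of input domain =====

-- B replaces A's running character accumulator with a boundary-index scan plus slicing (alternative decomposition, same cost).
-- The overlapping-window loop is textually identical in both Pythons, so both ports share pvWindows.

-- ===== PORT A =====
-- one step of A's inner character loop: current += c, then split at '. '/'.\n'
def pvStepA (cs : List Char) (st : List (List Char) × List Char) (ic : Int × Char) :
    List (List Char) × List Char :=
  let cur := st.2 ++ [ic.2]
  if ic.2 = '.' ∧ ic.1 + 1 < (cs.length : Int) then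
    if PySem.List.pyGet? cs (ic.1 + 1) = some ' ' ∨ PySem.List.pyGet? cs (ic.1 + 1) = some '\n' then
      if 20 < (PySem.Chars.strip cur).length then (st.1 ++ [cur], []) else (st.1, [])
    else (st.1, cur)
  else (st.1, cur)

-- A's sentence splitter for one page
def pvSentA (cs : List Char) : List (List Char) :=
  ((PySem.List.enumerate cs 0).foldl (pvStepA cs) ([], [])).1

-- the window loop, identical Python code in A and B: for i in range(len(sentences)-window_size+1): ...
def pvWindows (sentences : List (List Char)) (ws : Int) (pg : Int)
    (st : List String × List Int) : List String × List Int :=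
  (PySem.List.pyRange 0 ((sentences.length : Int) - ws + 1) 1).foldl
    (fun st i =>
      (st.1 ++ [String.ofList (PySem.Chars.join []
                  (PySem.List.slice sentences (some i) (some (i + ws))))],
       st.2 ++ [pg + 1])) st

def extract_passages (pages : List String) (window_size : Int) : List String × List Int :=
  (PySem.List.enumerate pages 0).foldl
    (fun st pp => pvWindows (pvSentA pp.2.toList) window_size pp.1 st) ([], [])

-- ===== PORT B =====
-- the boundary predicate of B's list comprehension: c == '.' and i+1 < n and page_text[i+1] in ' \n'
def pvBFun (cs : List Char) (ic : Int × Char) : Option Int :=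
  if ic.2 = '.' ∧ ic.1 + 1 < (cs.length : Int) ∧
     (PySem.List.pyGet? cs (ic.1 + 1) = some ' ' ∨ PySem.List.pyGet? cs (ic.1 + 1) = some '\n')
  then some ic.1 else none

def pvBoundaries (cs : List Char) : List Int :=
  (PySem.List.enumerate cs 0).filterMap (pvBFun cs)

-- one step of B's boundary loop: seg = page_text[prev+1 : b+1]; keep if its strip has length > 20
def pvStepB (cs : List Char) (st : List (List Char) × Int) (b : Int) : List (List Char) × Int :=
  let seg := PySem.List.slice cs (some (st.2 + 1)) (some (b + 1))
  if 20 < (PySem.Chars.strip seg).length then (st.1 ++ [seg], b) else (st.1, b)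

-- B's sentence splitter for one page
def pvSentB (cs : List Char) : List (List Char) :=
  ((pvBoundaries cs).foldl (pvStepB cs) ([], -1)).1

def extract_passages_alt (pages : List String) (window_size : Int) : List String × List Int :=
  (PySem.List.enumerate pages 0).foldl
    (fun st pp => pvWindows (pvSentB pp.2.toList) window_size pp.1 st) ([], [])

-- ===== PRECONDITION & SPEC =====
def Spec_extract_passages (pages : List String) (window_size : Int) (out : List String × List Int) : Prop := out = extract_passages_alt pages window_size
instance (pages : List String) (window_size : Int) (out : List String × List Int) : Decidable (Spec_extract_passages pages window_size out) := by unfold Spec_extract_passages; infer_instance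

-- ===== CLAIM (what is proved, stated in full; the proofs are below) =====
def Claim_equal_extract_passages : Prop := ∀ (pages : List String) (window_size : Int), Dom_extract_passages pages window_size → Spec_extract_passages pages window_size (extract_passages pages window_size)

-- ===== LEMMAS AND PROOFS =====

-- reference splitter both sentence extractors are proved equal to
def pvGo (cur : List Char) : List Char → List (List Char)
  | [] => []
  | c :: r =>
    if c = '.' ∧ (r.head? = some ' ' ∨ r.head? = some '\n') then
      (if 20 < (PySem.Chars.strip (cur ++ [c])).length then [cur ++ [c]] else []) ++ pvGo [] r
    else pvGo (cur ++ [c]) r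

lemma pvGet_drop (cs : List Char) (k : Nat) :
    PySem.List.pyGet? cs (k : Int) = (cs.drop k).head? := by
  rw [PySem.List.pyGet?_natCast, List.head?_drop]

lemma pvSentA_go (cs : List Char) :
    ∀ (rest : List Char) (k : Nat) (acc : List (List Char)) (cur : List Char),
      rest = cs.drop k →
      ((PySem.List.enumerate rest (k : Int)).foldl (pvStepA cs) (acc, cur)).1
        = acc ++ pvGo cur rest := by
  intro rest
  induction rest with
  | nil => intro k acc cur _; simp [PySem.List.enumerate_nil, pvGo]
  | cons c r ih =>
    intro k acc cur hrest
    have hk : k < cs.length := by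
      by_contra h
      simp [List.drop_eq_nil_of_le (Nat.le_of_not_lt h)] at hrest
    have hr : r = cs.drop (k + 1) := by
      have := congrArg List.tail hrest
      simpa [List.tail_drop] using this
    have hget : PySem.List.pyGet? cs ((k : Int) + 1) = r.head? := by
      have := pvGet_drop cs (k + 1)
      rw [hr]; rw [← this]; norm_cast
    have hlen : ((k : Int) + 1 < (cs.length : Int)) ↔ r ≠ [] := by
      have hlr : r.length = cs.length - (k + 1) := by rw [hr, List.length_drop]
      constructor
      · intro h hnil
        have : k + 1 < cs.length := by exact_mod_cast h
        have : 0 < r.length := by omega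
        simp [hnil] at this
      · intro hnil
        have : 0 < r.length := List.length_pos_iff.mpr hnil
        have : k + 1 < cs.length := by omega
        exact_mod_cast this
    rw [PySem.List.enumerate_cons]
    simp only [List.foldl_cons]
    by_cases hc : c = '.'
    · cases hhead : r.head? with
      | none =>
        have hrnil : r = [] := List.head?_eq_none_iff.mp hhead
        have hcond : ¬ ((k : Int) + 1 < (cs.length : Int)) := by
          rw [hlen]; simp [hrnil]
        have : pvStepA cs (acc, cur) ((k : Int), c) = (acc, cur ++ [c]) := by
          simp [pvStepA, hcond]
        rw [this]
        have := ih (k + 1) acc (cur ++ [c]) (by exact_mod_cast hr)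
        rw [show ((k : Int) + 1) = (((k + 1 : Nat)) : Int) by push_cast; ring] at *
        rw [this]
        simp [pvGo, hhead]
      | some x =>
        have hrne : r ≠ [] := by intro h; simp [h] at hhead
        have hlt : (k : Int) + 1 < (cs.length : Int) := hlen.mpr hrne
        by_cases hx : x = ' ' ∨ x = '\n'
        · have hgcond : PySem.List.pyGet? cs ((k : Int) + 1) = some ' ' ∨
              PySem.List.pyGet? cs ((k : Int) + 1) = some '\n' := by
            rw [hget, hhead]
            rcases hx with h | h <;> simp [h]
          have hgo : (c = '.' ∧ (r.head? = some ' ' ∨ r.head? = some '\n')) := by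
            constructor
            · exact hc
            · rw [hhead]; rcases hx with h | h <;> simp [h]
          by_cases hl : 20 < (PySem.Chars.strip (cur ++ [c])).length
          · rw [hc] at hl
            have : pvStepA cs (acc, cur) ((k : Int), c) = (acc ++ [cur ++ [c]], []) := by
              simp [pvStepA, hc, hlt, hgcond, hl]
            rw [this]
            have := ih (k + 1) (acc ++ [cur ++ [c]]) [] (by exact_mod_cast hr)
            rw [show ((k : Int) + 1) = (((k + 1 : Nat)) : Int) by push_cast; ring]
            rw [this]
            simp [pvGo, hgo, hl]
          · rw [hc] at hl
            have : pvStepA cs (acc, cur) ((k : Int), c) = (acc, []) := by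
              simp [pvStepA, hc, hlt, hgcond, hl]
            rw [this]
            have := ih (k + 1) acc [] (by exact_mod_cast hr)
            rw [show ((k : Int) + 1) = (((k + 1 : Nat)) : Int) by push_cast; ring]
            rw [this]
            simp [pvGo, hgo, hl]
        · have hgcond : ¬ (PySem.List.pyGet? cs ((k : Int) + 1) = some ' ' ∨
              PySem.List.pyGet? cs ((k : Int) + 1) = some '\n') := by
            rw [hget, hhead]
            intro h; rcases h with h | h <;> simp at h <;> tauto
          have hgo : ¬ (c = '.' ∧ (r.head? = some ' ' ∨ r.head? = some '\n')) := by
            rw [hhead]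
            intro ⟨_, h⟩; rcases h with h | h <;> simp at h <;> tauto
          have : pvStepA cs (acc, cur) ((k : Int), c) = (acc, cur ++ [c]) := by
            simp [pvStepA, hgcond]
          rw [this]
          have := ih (k + 1) acc (cur ++ [c]) (by exact_mod_cast hr)
          rw [show ((k : Int) + 1) = (((k + 1 : Nat)) : Int) by push_cast; ring]
          rw [this]
          simp [pvGo, hgo]
    · have hgo : ¬ (c = '.' ∧ (r.head? = some ' ' ∨ r.head? = some '\n')) := by tauto
      have : pvStepA cs (acc, cur) ((k : Int), c) = (acc, cur ++ [c]) := by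
        simp [pvStepA, hc]
      rw [this]
      have := ih (k + 1) acc (cur ++ [c]) (by exact_mod_cast hr)
      rw [show ((k : Int) + 1) = (((k + 1 : Nat)) : Int) by push_cast; ring]
      rw [this]
      simp [pvGo, hgo]

lemma pvTakeSucc (cs : List Char) (j k : Nat) (c : Char) (hjk : j ≤ k)
    (hc : (cs.drop k).head? = some c) :
    (cs.drop j).take (k + 1 - j) = (cs.drop j).take (k - j) ++ [c] := by
  have h1 : k + 1 - j = (k - j) + 1 := by omega
  have h2 : (cs.drop j)[k - j]? = some c := by
    rw [List.getElem?_drop, ← List.head?_drop, show j + (k - j) = k by omega, hc]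
  rw [h1, List.take_add_one, h2]
  rfl

lemma pvSentB_go (cs : List Char) :
    ∀ (rest : List Char) (k j : Nat) (acc : List (List Char)),
      rest = cs.drop k → j ≤ k →
      (((PySem.List.enumerate rest (k : Int)).filterMap (pvBFun cs)).foldl
          (pvStepB cs) (acc, (j : Int) - 1)).1
        = acc ++ pvGo ((cs.drop j).take (k - j)) rest := by
  intro rest
  induction rest with
  | nil => intro k j acc _ _; simp [PySem.List.enumerate_nil, pvGo]
  | cons c r ih =>
    intro k j acc hrest hjk
    have hk : k < cs.length := by
      by_contra h
      simp [List.drop_eq_nil_of_le (Nat.le_of_not_lt h)] at hrest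
    have hr : r = cs.drop (k + 1) := by
      have := congrArg List.tail hrest
      simpa [List.tail_drop] using this
    have hget : PySem.List.pyGet? cs ((k : Int) + 1) = r.head? := by
      have := pvGet_drop cs (k + 1)
      rw [hr]; rw [← this]; norm_cast
    have hlen : ((k : Int) + 1 < (cs.length : Int)) ↔ r ≠ [] := by
      have hlr : r.length = cs.length - (k + 1) := by rw [hr, List.length_drop]
      constructor
      · intro h hnil
        have : k + 1 < cs.length := by exact_mod_cast h
        have : 0 < r.length := by omega
        simp [hnil] at this
      · intro hnil
        have : 0 < r.length := List.length_pos_iff.mpr hnil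
        have : k + 1 < cs.length := by omega
        exact_mod_cast this
    have hcget : (cs.drop k).head? = some c := by rw [← hrest]; rfl
    rw [PySem.List.enumerate_cons]
    by_cases hb : c = '.' ∧ (r.head? = some ' ' ∨ r.head? = some '\n')
    · -- boundary at k
      have hrne : r ≠ [] := by
        intro h; rcases hb.2 with h2 | h2 <;> simp [h] at h2
      have hbf : pvBFun cs ((k : Int), c) = some (k : Int) := by
        have hg : PySem.List.pyGet? cs ((k : Int) + 1) = some ' ' ∨
            PySem.List.pyGet? cs ((k : Int) + 1) = some '\n' := by
          rw [hget]; exact hb.2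
        simp [pvBFun, hb.1, hlen.mpr hrne, hg]
      rw [List.filterMap_cons_some hbf, List.foldl_cons]
      have hseg : PySem.List.slice cs (some ((j : Int) - 1 + 1)) (some ((k : Int) + 1))
          = (cs.drop j).take (k - j) ++ [c] := by
        rw [show (j : Int) - 1 + 1 = (j : Int) by ring,
            show (k : Int) + 1 = (((k + 1 : Nat)) : Int) by push_cast; ring,
            PySem.List.slice_natCast]
        exact pvTakeSucc cs j k c hjk hcget
      by_cases hl : 20 < (PySem.Chars.strip ((cs.drop j).take (k - j) ++ [c])).length
      · have hstep : pvStepB cs (acc, (j : Int) - 1) (k : Int)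
            = (acc ++ [(cs.drop j).take (k - j) ++ [c]], (k : Int)) := by
          simp only [pvStepB, hseg]
          simp [hl]
        rw [hstep]
        have hlast : (k : Int) = (((k + 1 : Nat)) : Int) - 1 := by push_cast; ring
        rw [hlast, show ((((k + 1 : Nat)) : Int) - 1 + 1) = (((k + 1 : Nat)) : Int) by ring]
        have := ih (k + 1) (k + 1) (acc ++ [(cs.drop j).take (k - j) ++ [c]])
          (by exact_mod_cast hr) (le_refl _)
        rw [this]
        rw [hb.1] at hl
        simp [pvGo, hb, hl]
      · have hstep : pvStepB cs (acc, (j : Int) - 1) (k : Int) = (acc, (k : Int)) := by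
          simp only [pvStepB, hseg]
          simp [hl]
        rw [hstep]
        have hlast : (k : Int) = (((k + 1 : Nat)) : Int) - 1 := by push_cast; ring
        rw [hlast, show ((((k + 1 : Nat)) : Int) - 1 + 1) = (((k + 1 : Nat)) : Int) by ring]
        have := ih (k + 1) (k + 1) acc (by exact_mod_cast hr) (le_refl _)
        rw [this]
        rw [hb.1] at hl
        simp [pvGo, hb, hl]
    · -- no boundary at k
      have hbf : pvBFun cs ((k : Int), c) = none := by
        by_cases hc : c = '.'
        · cases hhead : r.head? with
          | none =>
            have hrnil : r = [] := List.head?_eq_none_iff.mp hhead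
            have hnl : ¬ ((k : Int) + 1 < (cs.length : Int)) := fun h => (hlen.mp h) hrnil
            simp [pvBFun, hnl]
          | some x =>
            have hx : ¬ (x = ' ' ∨ x = '\n') := by
              intro h; exact hb ⟨hc, by rw [hhead]; rcases h with h | h <;> simp [h]⟩
            have : ¬ (PySem.List.pyGet? cs ((k : Int) + 1) = some ' ' ∨
                PySem.List.pyGet? cs ((k : Int) + 1) = some '\n') := by
              rw [hget, hhead]
              intro h; rcases h with h | h <;> simp at h <;> tauto
            simp [pvBFun, this]
        · simp [pvBFun, hc]
      rw [List.filterMap_cons_none hbf]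
      rw [show ((k : Int) + 1) = (((k + 1 : Nat)) : Int) by push_cast; ring]
      have := ih (k + 1) j acc (by exact_mod_cast hr) (by omega)
      rw [this]
      have hcur : (cs.drop j).take (k + 1 - j) = (cs.drop j).take (k - j) ++ [c] :=
        pvTakeSucc cs j k c hjk hcget
      rw [hcur]
      simp [pvGo, hb]

lemma pvSent_eq (cs : List Char) : pvSentA cs = pvSentB cs := by
  have hA := pvSentA_go cs cs 0 [] [] (by simp)
  have hB := pvSentB_go cs cs 0 0 [] (by simp) (le_refl 0)
  unfold pvSentA pvSentB pvBoundaries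
  simp only [Nat.cast_zero] at hA hB
  rw [hA]
  rw [show ((0 : Int) - 1) = (-1 : Int) by ring] at hB
  rw [hB]
  simp

-- ===== VERDICT (by name: the statement is the Claim_ definition above) =====
theorem extract_passages_spec : Claim_equal_extract_passages := by
  intro pages window_size _
  unfold Spec_extract_passages extract_passages extract_passages_alt
  simp only [pvSent_eq]
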